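-- pv_equiv track=rewrite | github.com/iTutul/QuizLit | logic/scoring.py | merge_historical
-- ===== SOURCE A (Python) =====
-- def merge_historical(breakdown: dict, historical_scorecard) -> dict:
--     """
--     Merge session breakdown with optional historical scorecard data.
--
--     If historical_scorecard is None, cumulative == session values.
--     Categories present only in historical appear with session_points=0, session_max=0.
--     """
--     result = {}
--     for category, data in breakdown.items():
--         cumulative_points = data["session_points"]
--         cumulative_max = data["session_max"]
--         if historical_scorecard is not None:
--             hist = (
--                 historical_scorecard.get("category_summary", {}).get(category, {})
--             )
--             cumulative_points += hist.get("cumulative_points", 0)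
--             cumulative_max += hist.get("cumulative_max", 0)
--         result[category] = {
--             "session_points": data["session_points"],
--             "session_max": data["session_max"],
--             "cumulative_points": cumulative_points,
--             "cumulative_max": cumulative_max,
--         }
--
--     # Include historical-only categories
--     if historical_scorecard is not None:
--         for category, hist in historical_scorecard.get("category_summary", {}).items():
--             if category not in result:
--                 result[category] = {
--                     "session_points": 0,
--                     "session_max": 0,
--                     "cumulative_points": hist.get("cumulative_points", 0),
--                     "cumulative_max": hist.get("cumulative_max", 0),
--                 }
--
--     return result
-- ===== SOURCE B (Python) =====
-- def merge_historical(breakdown: dict, historical_scorecard) -> dict: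
--     """Scatter-gather: flatten both sources into one stream of per-category
--     contribution records (sp, sm, cp, cm), aggregate them by summing into a
--     running totals table, then format the totals."""
--     hist_summary = (
--         {} if historical_scorecard is None
--         else historical_scorecard.get("category_summary", {})
--     )
--     records = [
--         (cat, d["session_points"], d["session_max"],
--          d["session_points"], d["session_max"])
--         for cat, d in breakdown.items()
--     ] + [
--         (cat, 0, 0, h.get("cumulative_points", 0), h.get("cumulative_max", 0))
--         for cat, h in hist_summary.items()
--     ]
--     totals = {}
--     for cat, sp, sm, cp, cm in records:
--         t = totals.setdefault(cat, [0, 0, 0, 0])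
--         t[0] += sp
--         t[1] += sm
--         t[2] += cp
--         t[3] += cm
--     return {
--         cat: {"session_points": t[0], "session_max": t[1],
--               "cumulative_points": t[2], "cumulative_max": t[3]}
--         for cat, t in totals.items()
--     }
-- ===== Notes on version B (the rewrite author's own statement) =====
-- stated objective: alternative
-- what changed: B is a scatter-gather aggregation: it flattens both sources into one stream of per-category contribution records (session entries contribute (sp,sm,sp,sm), historical entries (0,0,cp,cm)), folds the stream into a running totals table keyed by category via setdefault+in-place addition, and formats the totals; A instead merges key-wise with two asymmetric passes and per-key lookups into the other side.
import Mathlib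
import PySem

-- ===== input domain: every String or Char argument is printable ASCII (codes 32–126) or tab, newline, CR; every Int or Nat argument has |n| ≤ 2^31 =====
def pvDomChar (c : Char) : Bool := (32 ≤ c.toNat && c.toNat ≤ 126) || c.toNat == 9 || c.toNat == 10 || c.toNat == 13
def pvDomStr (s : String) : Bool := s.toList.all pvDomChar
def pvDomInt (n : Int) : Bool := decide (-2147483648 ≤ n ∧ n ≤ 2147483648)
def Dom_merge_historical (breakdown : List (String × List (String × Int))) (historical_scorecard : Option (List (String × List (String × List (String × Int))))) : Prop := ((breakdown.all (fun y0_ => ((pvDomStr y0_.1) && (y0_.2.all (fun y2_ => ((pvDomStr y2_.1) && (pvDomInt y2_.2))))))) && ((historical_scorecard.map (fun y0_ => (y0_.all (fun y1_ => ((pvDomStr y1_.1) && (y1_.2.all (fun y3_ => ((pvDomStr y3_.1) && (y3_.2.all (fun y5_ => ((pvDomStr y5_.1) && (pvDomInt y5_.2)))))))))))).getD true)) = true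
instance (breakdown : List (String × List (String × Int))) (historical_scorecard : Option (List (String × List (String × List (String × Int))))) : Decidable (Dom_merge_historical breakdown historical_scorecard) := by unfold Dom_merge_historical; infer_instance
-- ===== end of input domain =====

-- B is a scatter-gather aggregation (one contribution stream folded into a totals
-- table) instead of A's two asymmetric key-wise merge passes (objective: alternative).

-- ===== PORT A =====
-- helper: historical_scorecard.get("category_summary", {}) as a dict of dicts
def pvCSumA (h : List (String × List (String × List (String × Int)))) : PySem.Dict String (List (String × Int)) :=
  PySem.Dict.ofList ((PySem.Dict.ofList h).getD "category_summary" [])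

-- literal transliteration of A: first loop over breakdown.items() (with the
-- None-branch inside), second loop adding historical-only categories.
-- data["session_points"] / data["session_max"] would raise KeyError on a
-- missing key; Pre_ guarantees presence, so the getD default 0 is never used.
def merge_historical (breakdown : List (String × List (String × Int))) (historical_scorecard : Option (List (String × List (String × List (String × Int))))) : List (String × List (String × Int)) :=
  let result : PySem.Dict String (List (String × Int)) :=
    (PySem.Dict.ofList breakdown).items.foldl (fun result p =>
      let data := PySem.Dict.ofList p.2
      let sp := data.getD "session_points" 0
      let sm := data.getD "session_max" 0
      let cum : Int × Int :=
        match historical_scorecard with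
        | none => (sp, sm)
        | some h =>
          let hist := PySem.Dict.ofList ((pvCSumA h).getD p.1 [])
          (sp + hist.getD "cumulative_points" 0, sm + hist.getD "cumulative_max" 0)
      result.insert p.1
        [("session_points", sp), ("session_max", sm),
         ("cumulative_points", cum.1), ("cumulative_max", cum.2)])
      PySem.Dict.empty
  let result2 : PySem.Dict String (List (String × Int)) :=
    match historical_scorecard with
    | none => result
    | some h =>
      (pvCSumA h).items.foldl (fun result q =>
        if result.contains q.1 then result
        else
          let hist := PySem.Dict.ofList q.2
          result.insert q.1
            [("session_points", 0), ("session_max", 0),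
             ("cumulative_points", hist.getD "cumulative_points" 0),
             ("cumulative_max", hist.getD "cumulative_max" 0)]) result
  result2.items

-- ===== PORT B =====
-- transliteration of Source B (scatter-gather). Python's `t = totals.setdefault(cat, [0,0,0,0]);
-- t[0] += sp; …` mutates the list held in the dict in place: ported exactly as
-- setdefault (append default if absent) followed by insert at the same key
-- (overwrite keeps the position), with the four in-place additions as pvAdd4.
def pvAdd4 (v : Int × Int × Int × Int) (r : String × Int × Int × Int × Int) : Int × Int × Int × Int :=
  (v.1 + r.2.1, v.2.1 + r.2.2.1, v.2.2.1 + r.2.2.2.1, v.2.2.2 + r.2.2.2.2)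

def pvStep (t : PySem.Dict String (Int × Int × Int × Int)) (r : String × Int × Int × Int × Int) : PySem.Dict String (Int × Int × Int × Int) :=
  let t1 := t.setdefault r.1 (0, 0, 0, 0)
  t1.insert r.1 (pvAdd4 (t1.getD r.1 (0, 0, 0, 0)) r)

def merge_historical_alt (breakdown : List (String × List (String × Int))) (historical_scorecard : Option (List (String × List (String × List (String × Int))))) : List (String × List (String × Int)) :=
  let hist_summary : PySem.Dict String (List (String × Int)) :=
    match historical_scorecard with
    | none => PySem.Dict.empty
    | some h => PySem.Dict.ofList ((PySem.Dict.ofList h).getD "category_summary" [])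
  let records : List (String × Int × Int × Int × Int) :=
    ((PySem.Dict.ofList breakdown).items.map (fun p =>
      let d := PySem.Dict.ofList p.2
      (p.1, d.getD "session_points" 0, d.getD "session_max" 0,
            d.getD "session_points" 0, d.getD "session_max" 0)))
    ++ (hist_summary.items.map (fun q =>
      let h := PySem.Dict.ofList q.2
      (q.1, (0 : Int), (0 : Int), h.getD "cumulative_points" 0, h.getD "cumulative_max" 0)))
  let totals : PySem.Dict String (Int × Int × Int × Int) :=
    records.foldl pvStep PySem.Dict.empty
  totals.items.map (fun p =>
    (p.1, [("session_points", p.2.1), ("session_max", p.2.2.1),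
           ("cumulative_points", p.2.2.2.1), ("cumulative_max", p.2.2.2.2)]))

-- ===== PRECONDITION & SPEC =====
-- Pre_ excludes exactly the inputs where A raises KeyError: an (effective,
-- last-duplicate-wins) breakdown entry whose value dict lacks a session key.
def Pre_merge_historical (breakdown : List (String × List (String × Int))) (historical_scorecard : Option (List (String × List (String × List (String × Int))))) : Prop :=
  ∀ p ∈ (PySem.Dict.ofList breakdown).items,
    (∃ q ∈ p.2, q.1 = "session_points") ∧ (∃ q ∈ p.2, q.1 = "session_max")
instance (breakdown : List (String × List (String × Int))) (historical_scorecard : Option (List (String × List (String × List (String × Int))))) : Decidable (Pre_merge_historical breakdown historical_scorecard) := by unfold Pre_merge_historical; infer_instance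

def pvWitness_merge_historical : (List (String × List (String × Int))) × (Option (List (String × List (String × List (String × Int))))) :=
  ([("a", [("session_points", 3), ("session_max", 5)])],
   some [("category_summary", [("b", [("cumulative_points", 2)])])])

def Spec_merge_historical (breakdown : List (String × List (String × Int))) (historical_scorecard : Option (List (String × List (String × List (String × Int))))) (out : List (String × List (String × Int))) : Prop := out = merge_historical_alt breakdown historical_scorecard
instance (breakdown : List (String × List (String × Int))) (historical_scorecard : Option (List (String × List (String × List (String × Int))))) (out : List (String × List (String × Int))) : Decidable (Spec_merge_historical breakdown historical_scorecard out) := by unfold Spec_merge_historical; infer_instance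

-- ===== CLAIM (what is proved, stated in full; the proofs are below) =====
def Claim_equal_merge_historical : Prop := ∀ (breakdown : List (String × List (String × Int))) (historical_scorecard : Option (List (String × List (String × List (String × Int))))), Dom_merge_historical breakdown historical_scorecard → Pre_merge_historical breakdown historical_scorecard → Spec_merge_historical breakdown historical_scorecard (merge_historical breakdown historical_scorecard)

-- ===== LEMMAS AND PROOFS =====

-- the per-row update a record stream l performs on an existing row p:
-- add the (unique) matching record of l, if any
def pvUpd (l : List (String × Int × Int × Int × Int)) (p : String × Int × Int × Int × Int) : String × Int × Int × Int × Int :=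
  (p.1, match l.find? (fun r => r.1 == p.1) with
        | some r => pvAdd4 p.2 r
        | none => p.2)

-- B's aggregation step on a key not yet in the table: setdefault appends the
-- zero row, the addition then overwrites it in place — one plain insert.
theorem pv_step_fresh (t : PySem.Dict String (Int × Int × Int × Int))
    (r : String × Int × Int × Int × Int) (h : t.contains r.1 = false) :
    pvStep t r = t.insert r.1 (pvAdd4 (0, 0, 0, 0) r) := by
  simp only [pvStep, PySem.Dict.setdefault_of_not_contains _ _ h,
    PySem.Dict.getD_insert_self, PySem.Dict.insert_insert_self]

-- … and on a key already present: read the current row, add, overwrite in place.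
theorem pv_step_hit (t : PySem.Dict String (Int × Int × Int × Int))
    (r : String × Int × Int × Int × Int) (h : t.contains r.1 = true) :
    pvStep t r = t.insert r.1 (pvAdd4 (t.getD r.1 (0, 0, 0, 0)) r) := by
  simp only [pvStep, PySem.Dict.setdefault_of_contains _ _ h]

-- characterisation of B's whole aggregation fold over a record stream with
-- distinct keys: rows for keys already in the table get the matching record
-- added in place, records with fresh keys are appended as new rows.
theorem pv_fold_step (l : List (String × Int × Int × Int × Int))
    (d : PySem.Dict String (Int × Int × Int × Int))
    (hndl : (l.map (fun r => r.1)).Nodup) (hndd : d.keys.Nodup) :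
    (l.foldl pvStep d).items =
      d.items.map (pvUpd l)
      ++ (l.filter (fun r => !(d.contains r.1))).map (fun r => (r.1, pvAdd4 (0, 0, 0, 0) r)) := by
  induction l generalizing d with
  | nil =>
    simp only [List.foldl_nil, List.filter_nil, List.map_nil, List.append_nil]
    rw [List.map_congr_left (fun p _ => show pvUpd [] p = id p by simp [pvUpd])]
    simp
  | cons r l ih =>
    simp only [List.map_cons, List.nodup_cons] at hndl
    obtain ⟨hr, hndl⟩ := hndl
    have hfind : l.find? (fun s => s.1 == r.1) = none := by
      rw [List.find?_eq_none]
      intro s hs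
      simp only [beq_iff_eq]
      intro hh; exact hr (hh ▸ List.mem_map_of_mem hs)
    rw [List.foldl_cons]
    by_cases hc : d.contains r.1 = true
    · rw [pv_step_hit _ _ hc]
      have hkeys := PySem.Dict.keys_insert_of_contains d (pvAdd4 (d.getD r.1 (0,0,0,0)) r) hc
      have hnd' : (d.insert r.1 (pvAdd4 (d.getD r.1 (0,0,0,0)) r)).keys.Nodup := by
        rw [hkeys]; exact hndd
      rw [ih _ hndl hnd']
      rw [List.filter_cons_of_neg (by simp [hc])]
      congr 1
      · rw [PySem.Dict.items_insert_of_contains _ _ hc, List.map_map]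
        refine List.map_congr_left (fun p hp => ?_)
        simp only [Function.comp_apply]
        by_cases hpe : p.1 = r.1
        · have hval : d.getD r.1 (0,0,0,0) = p.2 := by
            rw [← hpe]; exact PySem.Dict.getD_of_mem_items d hp hndd _
          simp [pvUpd, hpe, hfind, hval]
        · have hne : r.1 ≠ p.1 := fun hh => hpe hh.symm
          simp [pvUpd, hpe, hne]
      · refine congrArg _ (List.filter_congr (fun s _ => ?_))
        rw [PySem.Dict.contains_eq_decide_mem_keys, hkeys,
            ← PySem.Dict.contains_eq_decide_mem_keys]
    · have hcf : d.contains r.1 = false := by simpa using hc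
      rw [pv_step_fresh _ _ hcf]
      have hkeys := PySem.Dict.keys_insert_of_not_contains d (pvAdd4 (0,0,0,0) r) hcf
      have hrk : r.1 ∉ d.keys := by
        intro hm
        rw [PySem.Dict.contains_eq_decide_mem_keys] at hcf
        simp [hm] at hcf
      have hnd' : (d.insert r.1 (pvAdd4 (0,0,0,0) r)).keys.Nodup := by
        rw [hkeys]
        refine List.Nodup.append hndd (List.nodup_singleton _) ?_
        intro a ha hb
        simp only [List.mem_singleton] at hb
        exact hrk (hb ▸ ha)
      rw [ih _ hndl hnd']
      rw [PySem.Dict.items_insert_of_not_contains _ _ hcf]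
      rw [List.filter_cons_of_pos (by simp [hcf])]
      rw [List.map_append]
      have hmap1 : ∀ p ∈ d.items, pvUpd l p = pvUpd (r :: l) p := by
        intro p hp
        have hne : r.1 ≠ p.1 := by
          intro hh; exact hrk (hh ▸ PySem.Dict.mem_keys_of_mem_items d hp)
        simp [pvUpd, hne]
      have hmap2 : pvUpd l (r.1, pvAdd4 (0,0,0,0) r) = (r.1, pvAdd4 (0,0,0,0) r) := by
        simp [pvUpd, hfind]
      have hfil : List.filter (fun s => !(d.insert r.1 (pvAdd4 (0,0,0,0) r)).contains s.1) l
          = List.filter (fun s => !(d.contains s.1)) l := by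
        refine List.filter_congr (fun s hs => ?_)
        have hse : s.1 ≠ r.1 := fun hh => hr (hh ▸ List.mem_map_of_mem hs)
        rw [PySem.Dict.contains_insert]
        simp [hse]
      rw [List.map_congr_left hmap1, hfil]
      simp [hmap2]

-- A's second loop (insert only if the key is not yet present), over a list with
-- distinct keys, appends exactly the entries whose key is fresh for the start dict.
theorem pv_cond_fold {β V : Type} (l : List (String × β)) (d : PySem.Dict String V)
    (g : String × β → V) (hnd : (l.map Prod.fst).Nodup) :
    (l.foldl (fun d q => if d.contains q.1 then d else d.insert q.1 (g q)) d).items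
      = d.items ++ (l.filter (fun q => !(d.contains q.1))).map (fun q => (q.1, g q)) := by
  induction l generalizing d with
  | nil => simp
  | cons q l ih =>
    simp only [List.map_cons, List.nodup_cons] at hnd
    simp only [List.foldl_cons, List.filter_cons]
    by_cases hc : d.contains q.1 = true
    · simp only [hc, if_true, Bool.not_true, Bool.false_eq_true, if_false]
      exact ih d hnd.2
    · have hcf : d.contains q.1 = false := by simpa using hc
      have hfc : ∀ r ∈ l, (!(d.insert q.1 (g q)).contains r.1) = (!d.contains r.1) := by
        intro r hr
        have hne : r.1 ≠ q.1 := by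
          intro hh; exact hnd.1 (hh ▸ List.mem_map_of_mem hr)
        simp [PySem.Dict.contains_insert, hne]
      simp only [hcf, Bool.not_false, if_true, Bool.false_eq_true, if_false]
      rw [ih (d.insert q.1 (g q)) hnd.2,
          PySem.Dict.items_insert_of_not_contains _ _ hcf,
          List.filter_congr hfc]
      simp

-- first matching historical record in B's stream is the historical dict lookup
theorem pv_find_recH (hl : List (String × List (String × Int))) (c : String) :
    List.find? (fun r => r.1 == c)
      (hl.map (fun q => (q.1, (0 : Int), (0 : Int),
        (PySem.Dict.ofList q.2).getD "cumulative_points" 0,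
        (PySem.Dict.ofList q.2).getD "cumulative_max" 0)))
    = ((PySem.Dict.mk hl).get? c).map (fun v => (c, (0 : Int), (0 : Int),
        (PySem.Dict.ofList v).getD "cumulative_points" 0,
        (PySem.Dict.ofList v).getD "cumulative_max" 0)) := by
  induction hl with
  | nil => rfl
  | cons q l ih =>
    obtain ⟨k, v⟩ := q
    rw [List.map_cons, List.find?_cons, PySem.Dict.get?_mk_cons]
    by_cases hq : k = c
    · subst hq; simp
    · have hb : (k == c) = false := by simp [hq]
      simp [hb, ih]

-- filtering B's historical records by key is filtering the items then mapping
theorem pv_filter_recH (hl : List (String × List (String × Int))) (f : String → Bool) :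
    List.filter (fun r => f r.1)
      (hl.map (fun q => (q.1, (0 : Int), (0 : Int),
        (PySem.Dict.ofList q.2).getD "cumulative_points" 0,
        (PySem.Dict.ofList q.2).getD "cumulative_max" 0)))
    = (hl.filter (fun q => f q.1)).map (fun q => (q.1, (0 : Int), (0 : Int),
        (PySem.Dict.ofList q.2).getD "cumulative_points" 0,
        (PySem.Dict.ofList q.2).getD "cumulative_max" 0)) := by
  rw [List.filter_map]
  rfl

-- case historical_scorecard = None
theorem pv_merge_none (bd : List (String × List (String × Int))) :
    merge_historical bd none = merge_historical_alt bd none := by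
  have hndB := PySem.Dict.nodup_keys_ofList bd
  simp only [merge_historical, merge_historical_alt]
  rw [PySem.Dict.items_foldl_insert_fresh (PySem.Dict.ofList bd).items
        (fun p => p.1)
        (fun p => [("session_points", (PySem.Dict.ofList p.2).getD "session_points" 0),
                   ("session_max", (PySem.Dict.ofList p.2).getD "session_max" 0),
                   ("cumulative_points", (PySem.Dict.ofList p.2).getD "session_points" 0),
                   ("cumulative_max", (PySem.Dict.ofList p.2).getD "session_max" 0)])
        PySem.Dict.empty (fun a _ => PySem.Dict.contains_empty _) hndB]
  have hnd1 : (((PySem.Dict.ofList bd).items.map (fun p =>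
      ((p.1 : String), (PySem.Dict.ofList p.2).getD "session_points" 0,
        (PySem.Dict.ofList p.2).getD "session_max" 0,
        (PySem.Dict.ofList p.2).getD "session_points" 0,
        (PySem.Dict.ofList p.2).getD "session_max" 0))).map (fun r => r.1)).Nodup := by
    rw [List.map_map]
    exact hndB
  rw [show ((PySem.Dict.empty : PySem.Dict String (List (String × Int))).items) = ([] : List (String × List (String × Int))) from rfl]
  rw [List.map_nil, List.append_nil]
  rw [pv_fold_step _ _ hnd1 PySem.Dict.nodup_keys_empty]
  simp [pvAdd4, PySem.Dict.contains_empty, Function.comp,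
        show (PySem.Dict.empty : PySem.Dict String (Int × Int × Int × Int)).items = [] from rfl]

-- case historical_scorecard = Some h
theorem pv_merge_some (bd : List (String × List (String × Int)))
    (h : List (String × List (String × List (String × Int)))) :
    merge_historical bd (some h) = merge_historical_alt bd (some h) := by
  have hndB := PySem.Dict.nodup_keys_ofList bd
  have hndC : (pvCSumA h).keys.Nodup := PySem.Dict.nodup_keys_ofList _
  simp only [merge_historical, merge_historical_alt]
  rw [← (show pvCSumA h = PySem.Dict.ofList ((PySem.Dict.ofList h).getD "category_summary" []) from rfl)]
  -- A's second loop appends the historical-only entries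
  rw [pv_cond_fold _ _ _ hndC]
  -- A's first loop
  rw [PySem.Dict.items_foldl_insert_fresh (PySem.Dict.ofList bd).items
        (fun p => p.1)
        (fun p => [("session_points", (PySem.Dict.ofList p.2).getD "session_points" 0),
                   ("session_max", (PySem.Dict.ofList p.2).getD "session_max" 0),
                   ("cumulative_points", (PySem.Dict.ofList p.2).getD "session_points" 0 + (PySem.Dict.ofList ((pvCSumA h).getD p.1 [])).getD "cumulative_points" 0),
                   ("cumulative_max", (PySem.Dict.ofList p.2).getD "session_max" 0 + (PySem.Dict.ofList ((pvCSumA h).getD p.1 [])).getD "cumulative_max" 0)])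
        PySem.Dict.empty (fun a _ => PySem.Dict.contains_empty _) hndB]
  -- membership in A's first-loop dict is membership in breakdown
  have hck : ∀ k, (List.foldl
          (fun result p =>
            result.insert p.1
              [("session_points", (PySem.Dict.ofList p.2).getD "session_points" 0),
                ("session_max", (PySem.Dict.ofList p.2).getD "session_max" 0),
                ("cumulative_points",
                  (PySem.Dict.ofList p.2).getD "session_points" 0 +
                    (PySem.Dict.ofList ((pvCSumA h).getD p.1 [])).getD "cumulative_points" 0),
                ("cumulative_max",
                  (PySem.Dict.ofList p.2).getD "session_max" 0 +
                    (PySem.Dict.ofList ((pvCSumA h).getD p.1 [])).getD "cumulative_max" 0)])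
          PySem.Dict.empty (PySem.Dict.ofList bd).items).contains k
        = (PySem.Dict.ofList bd).contains k := by
    intro k
    rw [PySem.Dict.contains_eq_decide_mem_keys, PySem.Dict.contains_eq_decide_mem_keys]
    rw [PySem.Dict.keys_foldl_insert_key (PySem.Dict.ofList bd).items (fun p => p.1)
          (fun _ p => [("session_points", (PySem.Dict.ofList p.2).getD "session_points" 0),
                       ("session_max", (PySem.Dict.ofList p.2).getD "session_max" 0),
                       ("cumulative_points", (PySem.Dict.ofList p.2).getD "session_points" 0 + (PySem.Dict.ofList ((pvCSumA h).getD p.1 [])).getD "cumulative_points" 0),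
                       ("cumulative_max", (PySem.Dict.ofList p.2).getD "session_max" 0 + (PySem.Dict.ofList ((pvCSumA h).getD p.1 [])).getD "cumulative_max" 0)])
          PySem.Dict.empty]
    simp [PySem.Set.update_nil_left, PySem.Set.mem_ofList, PySem.Dict.keys]
  -- B's stream, session part then historical part
  rw [List.foldl_append]
  have hnd1 : (((PySem.Dict.ofList bd).items.map (fun p =>
      ((p.1 : String), (PySem.Dict.ofList p.2).getD "session_points" 0,
        (PySem.Dict.ofList p.2).getD "session_max" 0,
        (PySem.Dict.ofList p.2).getD "session_points" 0,
        (PySem.Dict.ofList p.2).getD "session_max" 0))).map (fun r => r.1)).Nodup := by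
    rw [List.map_map]; exact hndB
  have hd1items : (List.foldl pvStep PySem.Dict.empty
      ((PySem.Dict.ofList bd).items.map (fun p =>
        ((p.1 : String), (PySem.Dict.ofList p.2).getD "session_points" 0,
          (PySem.Dict.ofList p.2).getD "session_max" 0,
          (PySem.Dict.ofList p.2).getD "session_points" 0,
          (PySem.Dict.ofList p.2).getD "session_max" 0)))).items
      = (PySem.Dict.ofList bd).items.map (fun p =>
          ((p.1 : String), pvAdd4 (0,0,0,0)
            ((p.1 : String), (PySem.Dict.ofList p.2).getD "session_points" 0,
              (PySem.Dict.ofList p.2).getD "session_max" 0,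
              (PySem.Dict.ofList p.2).getD "session_points" 0,
              (PySem.Dict.ofList p.2).getD "session_max" 0))) := by
    rw [pv_fold_step _ _ hnd1 PySem.Dict.nodup_keys_empty]
    simp [PySem.Dict.contains_empty,
          show (PySem.Dict.empty : PySem.Dict String (Int × Int × Int × Int)).items = [] from rfl,
          List.map_map, Function.comp]
  have hd1keys : (List.foldl pvStep PySem.Dict.empty
      ((PySem.Dict.ofList bd).items.map (fun p =>
        ((p.1 : String), (PySem.Dict.ofList p.2).getD "session_points" 0,
          (PySem.Dict.ofList p.2).getD "session_max" 0,
          (PySem.Dict.ofList p.2).getD "session_points" 0,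
          (PySem.Dict.ofList p.2).getD "session_max" 0)))).keys
      = (PySem.Dict.ofList bd).keys := by
    show (List.foldl pvStep PySem.Dict.empty _).items.map (fun p => p.1) = _
    rw [hd1items, List.map_map]
    rfl
  have hd1nd : (List.foldl pvStep PySem.Dict.empty
      ((PySem.Dict.ofList bd).items.map (fun p =>
        ((p.1 : String), (PySem.Dict.ofList p.2).getD "session_points" 0,
          (PySem.Dict.ofList p.2).getD "session_max" 0,
          (PySem.Dict.ofList p.2).getD "session_points" 0,
          (PySem.Dict.ofList p.2).getD "session_max" 0)))).keys.Nodup := by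
    rw [hd1keys]; exact hndB
  have hnd2 : (((pvCSumA h).items.map (fun q =>
      ((q.1 : String), (0 : Int), (0 : Int),
        (PySem.Dict.ofList q.2).getD "cumulative_points" 0,
        (PySem.Dict.ofList q.2).getD "cumulative_max" 0))).map (fun r => r.1)).Nodup := by
    rw [List.map_map]; exact hndC
  rw [pv_fold_step _ _ hnd2 hd1nd]
  rw [List.map_append]
  congr 1
  · -- breakdown-derived entries
    rw [hd1items, List.map_map, List.map_map]
    refine List.map_congr_left (fun p hp => ?_)
    simp only [Function.comp_apply, pvUpd]
    rw [pv_find_recH (pvCSumA h).items p.1,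
        show PySem.Dict.mk (pvCSumA h).items = pvCSumA h from rfl]
    cases hg : (pvCSumA h).get? p.1 with
    | none =>
      rw [PySem.Dict.getD_of_get?_eq_none _ _ hg]
      simp [pvAdd4]
      exact ⟨rfl, rfl⟩
    | some hv =>
      rw [PySem.Dict.getD_of_get?_eq_some _ _ hg]
      simp [pvAdd4]
  · -- historical-only entries
    rw [pv_filter_recH (pvCSumA h).items
          (fun c => !(List.foldl pvStep PySem.Dict.empty
            ((PySem.Dict.ofList bd).items.map (fun p =>
              (p.1, (PySem.Dict.ofList p.2).getD "session_points" 0,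
                (PySem.Dict.ofList p.2).getD "session_max" 0,
                (PySem.Dict.ofList p.2).getD "session_points" 0,
                (PySem.Dict.ofList p.2).getD "session_max" 0)))).contains c)]
    rw [List.map_map]
    have hfil1 : ∀ q ∈ (pvCSumA h).items,
        (!(List.foldl pvStep PySem.Dict.empty
          ((PySem.Dict.ofList bd).items.map (fun p =>
            (p.1, (PySem.Dict.ofList p.2).getD "session_points" 0,
              (PySem.Dict.ofList p.2).getD "session_max" 0,
              (PySem.Dict.ofList p.2).getD "session_points" 0,
              (PySem.Dict.ofList p.2).getD "session_max" 0)))).contains q.1)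
        = (!(PySem.Dict.ofList bd).contains q.1) := by
      intro q _
      rw [PySem.Dict.contains_eq_decide_mem_keys, hd1keys,
          ← PySem.Dict.contains_eq_decide_mem_keys]
    have hfil2 : ∀ q ∈ (pvCSumA h).items,
        (!(List.foldl
          (fun result p =>
            result.insert p.1
              [("session_points", (PySem.Dict.ofList p.2).getD "session_points" 0),
                ("session_max", (PySem.Dict.ofList p.2).getD "session_max" 0),
                ("cumulative_points",
                  (PySem.Dict.ofList p.2).getD "session_points" 0 +
                    (PySem.Dict.ofList ((pvCSumA h).getD p.1 [])).getD "cumulative_points" 0),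
                ("cumulative_max",
                  (PySem.Dict.ofList p.2).getD "session_max" 0 +
                    (PySem.Dict.ofList ((pvCSumA h).getD p.1 [])).getD "cumulative_max" 0)])
          PySem.Dict.empty (PySem.Dict.ofList bd).items).contains q.1)
        = (!(PySem.Dict.ofList bd).contains q.1) := by
      intro q _
      rw [hck q.1]
    rw [List.filter_congr hfil1, List.filter_congr hfil2]
    rw [List.map_map]
    refine List.map_congr_left (fun q hq => ?_)
    simp [Function.comp, pvAdd4]

-- ===== VERDICT (by name: the statement is the Claim_ definition above) =====
theorem merge_historical_spec : Claim_equal_merge_historical := by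
  intro bd hso _ _
  unfold Spec_merge_historical
  cases hso with
  | none => exact pv_merge_none bd
  | some h => exact pv_merge_some bd h
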